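-- pv_equiv track=rewrite | github.com/miliar/Code_Jam_Webscraper | solutions_python/solutions_year17_round0_nr3/395.py | solve_stalls
-- ===== SOURCE A (Python) =====
-- def split_one_space(s):
--     s2 = (s - 1) // 2
--     s1 = s - 1 - s2
--     return [s1, s2]
--
-- def split_spaces(n1o, n2o, s1o, s2o):
--     s2 = (s2o - 1) // 2
--     s1 = s2 + 1
--     if s2o % 2 == 1:  # Smaller s is even
--         n2 = 2 * n2o + n1o
--         n1 = n1o
--     else:
--         n2 = n2o
--         n1 = 2 * n1o + n2o
--     return n1, n2, s1, s2
--
-- def solve_stalls(N, K):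
--
--     # full_splits = int(math.log2(K))
--
--     # spaces = 2 ** full_splits
--
--     # space_len = (N - (spaces - 1)) / spaces
--     # s2 = int(space_len)
--     # s1 = s1 + 1
--
--     # spaces // s1
--
--
--     # if K == 1
--     #     return split_one_space(N)
--
--     k = 0
--     for i in range(N):  # Not going all the way ever
--         if i == 0:
--             n1, n2, s1, s2 = 1, 0, N, (N - 1)
--         else:
--             n1, n2, s1, s2 = split_spaces(n1, n2, s1, s2)
--         # print (i)
--         # print (n1, n2, s1, s2)
--         new_k = k + 2**i
--         if new_k < K:
--             k = new_k
--             continue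
--         # else now going to finish
--         # print ('final')
--         K_left = K - k
--         # print (K_left)
--         if K_left <= n1:
--             return split_one_space(s1)
--         else:
--             return split_one_space(s2)
-- ===== SOURCE B (Python) =====
-- def split_one_space(s):
--     s2 = (s - 1) // 2
--     s1 = s - 1 - s2
--     return [s1, s2]
--
-- def solve_stalls(N, K):
--     K = max(K, 1)
--     i = K.bit_length() - 1           # level at which the K-th person picks
--     m = 1 << i                       # number of gaps at that level
--     R = N - (m - 1)                  # total empty space left at that level
--     q, r = divmod(R, m)              # r gaps of size q+1, m-r gaps of size q
--     if K - (m - 1) <= r: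
--         return split_one_space(q + 1)
--     return split_one_space(q)
-- ===== Notes on version B (the rewrite author's own statement) =====
-- stated objective: simpler
-- what changed: Replaces A's level-by-level simulation (looping split_spaces to track counts and sizes of the two gap lengths) with a closed form: the K-th person picks at level i = bit_length(K)-1, where the 2^i gaps have sizes divmod(N-(2^i-1), 2^i), so one divmod decides which gap is split.
-- outside the precondition, e.g. on solve_stalls(0, 0): A returns None, B returns [0, -1]; on solve_stalls(2, 5): A returns None, B returns [0, -1]
import Mathlib
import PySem

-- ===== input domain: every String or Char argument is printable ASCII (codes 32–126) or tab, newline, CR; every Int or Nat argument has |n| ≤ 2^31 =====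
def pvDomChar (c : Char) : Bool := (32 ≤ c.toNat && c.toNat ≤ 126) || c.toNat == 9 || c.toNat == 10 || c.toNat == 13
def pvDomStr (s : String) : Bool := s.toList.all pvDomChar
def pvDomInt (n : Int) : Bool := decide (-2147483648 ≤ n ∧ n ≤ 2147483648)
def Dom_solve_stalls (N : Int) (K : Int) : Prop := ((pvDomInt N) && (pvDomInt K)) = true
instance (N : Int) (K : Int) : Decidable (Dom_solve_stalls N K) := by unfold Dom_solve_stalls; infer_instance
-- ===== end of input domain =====

-- B replaces A's level-by-level split_spaces simulation by a closed form (the level is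
-- bit_length(K)-1 and one divmod gives the two gap sizes); simpler, same return value.

-- ===== PORT A =====
def splitOneSpace (s : Int) : List Int :=
  let s2 := PySem.Int.floordiv (s - 1) 2
  let s1 := s - 1 - s2
  [s1, s2]

def splitSpaces (n1o n2o s1o s2o : Int) : Int × Int × Int × Int :=
  let s2 := PySem.Int.floordiv (s2o - 1) 2
  let s1 := s2 + 1
  if PySem.Int.mod s2o 2 = 1 then (n1o, 2 * n2o + n1o, s1, s2)
  else (2 * n1o + n2o, n2o, s1, s2)

-- the 'for i in range(N)' loop with early return; fuel = N.toNat, i counts up from 0;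
-- none = the loop is exhausted (Python falls off and returns None; excluded by Pre_)
def solveStallsLoop (N K : Int) : Nat → Nat → Int → Int → Int → Int → Int → Option (List Int)
  | 0, _, _, _, _, _, _ => none
  | fuel + 1, i, k, n1, n2, s1, s2 =>
    match (if i = 0 then ((1 : Int), (0 : Int), N, N - 1) else splitSpaces n1 n2 s1 s2) with
    | (n1, n2, s1, s2) =>
      let newK := k + 2 ^ i
      if newK < K then solveStallsLoop N K fuel (i + 1) newK n1 n2 s1 s2
      else
        let Kleft := K - k
        if Kleft ≤ n1 then some (splitOneSpace s1) else some (splitOneSpace s2)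

def solve_stalls (N : Int) (K : Int) : List Int :=
  (solveStallsLoop N K N.toNat 0 0 0 0 0 0).getD []

-- ===== PORT B =====
def solve_stalls_alt (N : Int) (K : Int) : List Int :=
  let K' := max K 1
  let i := PySem.Int.bitLength K' - 1   -- K.bit_length() - 1
  let m : Int := 2 ^ i                  -- 1 << i
  let R := N - (m - 1)
  let q := PySem.Int.floordiv R m
  let r := PySem.Int.mod R m
  if K' - (m - 1) ≤ r then splitOneSpace (q + 1) else splitOneSpace q

-- ===== PRECONDITION & SPEC =====
-- Pre_ excludes exactly the inputs where Python A falls off its loop and returns None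
-- (no List value): N ≤ 0, or K > 2^N - 1.  The 'min N.toNat 62' cap only keeps the bound
-- cheap to decide; within Dom (|K| ≤ 2^31 < 2^62 - 1) it is equivalent to K ≤ 2^N - 1.
def Pre_solve_stalls (N : Int) (K : Int) : Prop :=
  1 ≤ N ∧ K ≤ 2 ^ (min N.toNat 62) - 1
instance (N : Int) (K : Int) : Decidable (Pre_solve_stalls N K) := by
  unfold Pre_solve_stalls; infer_instance

def pvWitness_solve_stalls : Int × Int := (7, 4)

def Spec_solve_stalls (N : Int) (K : Int) (out : List Int) : Prop := out = solve_stalls_alt N K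
instance (N : Int) (K : Int) (out : List Int) : Decidable (Spec_solve_stalls N K out) := by
  unfold Spec_solve_stalls; infer_instance

-- ===== CLAIM (what is proved, stated in full; the proofs are below) =====
def Claim_equal_solve_stalls : Prop :=
  ∀ (N : Int) (K : Int), Dom_solve_stalls N K → Pre_solve_stalls N K →
    Spec_solve_stalls N K (solve_stalls N K)

-- ===== LEMMAS AND PROOFS =====

-- closed-form loop state at level i: m = 2^i gaps, R = N - (m-1) total space,
-- (q, r) = divmod(R, m); A stores it as (n1, n2, s1, s2)
def stInv (N : Int) (i : Nat) : Int × Int × Int × Int :=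
  let m : Int := 2 ^ i
  let R := N - (m - 1)
  let q := R / m
  let r := R % m
  if r = 0 then (m, 0, q, q - 1) else (r, m - r, q + 1, q)

theorem ediv_emod_pair (a b q r : Int) (hb : 0 < b) (h : a = b * q + r)
    (h0 : 0 ≤ r) (h1 : r < b) : a / b = q ∧ a % b = r := by
  have := Int.ediv_emod_unique (a := a) (b := b) (q := q) (r := r) (by omega)
  exact this.mpr ⟨by omega, h0, h1⟩

theorem stInv_zero (N : Int) : stInv N 0 = (1, 0, N, N - 1) := by
  simp [stInv]

theorem stInv_step (N : Int) (i : Nat) :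
    splitSpaces (stInv N i).1 (stInv N i).2.1 (stInv N i).2.2.1 (stInv N i).2.2.2
      = stInv N (i + 1) := by
  have hm : (0 : Int) < 2 ^ i := by positivity
  have hm' : (0 : Int) < 2 ^ (i + 1) := by positivity
  have hpow : (2 : Int) ^ (i + 1) = 2 * 2 ^ i := by ring
  set m : Int := 2 ^ i with hmdef
  set M : Int := 2 ^ (i + 1) with hMdef
  have hM2 : M = 2 * m := hpow
  set R : Int := N - (m - 1) with hRdef
  set q : Int := R / m with hqdef
  set r : Int := R % m with hrdef
  have hqr : m * q + r = R := Int.ediv_add_emod R m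
  have hr0 : 0 ≤ r := Int.emod_nonneg R (ne_of_gt hm)
  have hrm : r < m := Int.emod_lt_of_pos R hm
  have hR' : N - (M - 1) = R - m := by omega
  set t : Int := q / 2 with htdef
  have hq2 : q % 2 = 0 ∨ q % 2 = 1 := Int.emod_two_eq_zero_or_one q
  have htq : 2 * t + q % 2 = q := by omega
  have hst : stInv N i = if r = 0 then (m, 0, q, q - 1) else (r, m - r, q + 1, q) := rfl
  have hst' : stInv N (i + 1)
      = if (R - m) % M = 0 then (M, 0, (R - m) / M, (R - m) / M - 1)
        else ((R - m) % M, M - (R - m) % M, (R - m) / M + 1, (R - m) / M) := by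
    unfold stInv
    simp only []
    rw [hR']
  rw [hst, hst']
  by_cases hr : r = 0
  · rw [if_pos hr]
    simp only []
    unfold splitSpaces
    rw [PySem.Int.floordiv_eq_ediv_of_pos (by norm_num),
      PySem.Int.mod_eq_emod_of_pos (by norm_num)]
    rcases hq2 with hpar | hpar
    · -- q even: s2o = q - 1 is odd; children (q', r') = (t - 1, m)
      obtain ⟨hd1, hd2⟩ : (R - m) / M = t - 1 ∧ (R - m) % M = m :=
        ediv_emod_pair _ _ _ _ hm'
          (by linear_combination -hqr - m * htq + m * hpar + hr + (1 - t) * hM2)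
          (by omega) (by omega)
      rw [hd1, hd2, if_pos (show (q - 1) % 2 = 1 by omega),
        if_neg (show ¬ m = 0 by omega)]
      simp only [Prod.mk.injEq, true_and]
      refine ⟨by omega, by omega, by omega⟩
    · -- q odd: s2o = q - 1 is even; children (q', r') = (t, 0)
      obtain ⟨hd1, hd2⟩ : (R - m) / M = t ∧ (R - m) % M = 0 :=
        ediv_emod_pair _ _ _ _ hm'
          (by linear_combination -hqr - m * htq + m * hpar + hr - t * hM2)
          (by omega) (by omega)
      rw [hd1, hd2, if_neg (show ¬ (q - 1) % 2 = 1 by omega), if_pos rfl]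
      simp only [Prod.mk.injEq]
      exact ⟨by omega, trivial, by omega, by omega⟩
  · rw [if_neg hr]
    simp only []
    unfold splitSpaces
    rw [PySem.Int.floordiv_eq_ediv_of_pos (by norm_num),
      PySem.Int.mod_eq_emod_of_pos (by norm_num)]
    rcases hq2 with hpar | hpar
    · -- q even: s2o = q even; children (q', r') = (t - 1, m + r)
      obtain ⟨hd1, hd2⟩ : (R - m) / M = t - 1 ∧ (R - m) % M = m + r :=
        ediv_emod_pair _ _ _ _ hm'
          (by linear_combination -hqr - m * htq + m * hpar + (1 - t) * hM2)
          (by omega) (by omega)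
      rw [hd1, hd2, if_neg (show ¬ q % 2 = 1 by omega),
        if_neg (show ¬ m + r = 0 by omega)]
      simp only [Prod.mk.injEq]
      refine ⟨by omega, by omega, by omega, by omega⟩
    · -- q odd: s2o = q odd; children (q', r') = (t, r)
      obtain ⟨hd1, hd2⟩ : (R - m) / M = t ∧ (R - m) % M = r :=
        ediv_emod_pair _ _ _ _ hm'
          (by linear_combination -hqr - m * htq + m * hpar - t * hM2)
          (by omega) (by omega)
      rw [hd1, hd2, if_pos (show q % 2 = 1 by omega),
        if_neg (show ¬ r = 0 by omega)]
      simp only [Prod.mk.injEq]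
      exact ⟨trivial, by omega, by omega, by omega⟩

-- B's level index agrees with the stopping level of A's loop
theorem bitLength_eq (K : Int) (i : Nat) (h1 : 2 ^ i ≤ K) (h2 : K < 2 ^ (i + 1)) :
    PySem.Int.bitLength K = i + 1 := by
  have hm : (0 : Int) < 2 ^ i := by positivity
  have hK1 : 1 ≤ K := by omega
  have hc1 : ((2 ^ i : Nat) : Int) = 2 ^ i := by push_cast; ring
  have hc2 : ((2 ^ (i + 1) : Nat) : Int) = 2 ^ (i + 1) := by push_cast; ring
  have hub := PySem.Int.lt_two_pow_bitLength K
  have hlb := PySem.Int.two_pow_bitLength_le K (by omega)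
  have habs : (K.natAbs : Int) = K := by omega
  have h1' : 2 ^ i ≤ K.natAbs := by omega
  have h2' : K.natAbs < 2 ^ (i + 1) := by omega
  have hbl1 : 1 ≤ PySem.Int.bitLength K := by
    rcases Nat.eq_zero_or_pos (PySem.Int.bitLength K) with h | h
    · rw [h] at hub
      simp at hub
      omega
    · exact h
  have ha : PySem.Int.bitLength K - 1 < i + 1 :=
    (Nat.pow_lt_pow_iff_right (by omega)).mp (lt_of_le_of_lt hlb h2')
  have hb : i < PySem.Int.bitLength K :=
    (Nat.pow_lt_pow_iff_right (by omega)).mp (lt_of_le_of_lt h1' hub)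
  omega

-- at the stopping level, A's branch on stInv returns exactly B's value
theorem stop_eq (N K : Int) (i : Nat) (h1 : 2 ^ i ≤ K) (h2 : K < 2 ^ (i + 1)) :
    (if K - (2 ^ i - 1) ≤ (stInv N i).1 then splitOneSpace (stInv N i).2.2.1
     else splitOneSpace (stInv N i).2.2.2) = solve_stalls_alt N K := by
  have hm : (0 : Int) < 2 ^ i := by positivity
  have hK1 : 1 ≤ K := by omega
  have hmax : max K 1 = K := by omega
  have hpow : (2 : Int) ^ (i + 1) = 2 * 2 ^ i := by ring
  have hK2 : K < 2 * 2 ^ i := by omega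
  unfold solve_stalls_alt
  simp only []
  rw [hmax, bitLength_eq K i h1 h2, Nat.add_sub_cancel,
    PySem.Int.floordiv_eq_ediv_of_pos hm, PySem.Int.mod_eq_emod_of_pos hm]
  set m : Int := 2 ^ i with hmdef
  set R : Int := N - (m - 1) with hRdef
  have hr0 : 0 ≤ R % m := Int.emod_nonneg R (ne_of_gt hm)
  have hrm : R % m < m := Int.emod_lt_of_pos R hm
  have hst : stInv N i
      = if R % m = 0 then (m, 0, R / m, R / m - 1)
        else (R % m, m - R % m, R / m + 1, R / m) := rfl
  rw [hst]
  by_cases hr : R % m = 0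
  · -- all gaps have size q: both sides split a gap of size q
    rw [if_pos hr, hr]
    simp only []
    rw [if_pos (show K - (m - 1) ≤ m by omega),
      if_neg (show ¬ K - (m - 1) ≤ (0 : Int) by omega)]
  · -- r gaps of size q + 1 come first: the condition is identical on both sides
    rw [if_neg hr]

-- the main loop invariant: entered iteration i with k = 2^i - 1 and (for i ≥ 1) the
-- state stInv N (i-1), with enough fuel, the loop returns B's value
theorem loop_eq (N K : Int) (hK : 1 ≤ K) :
    ∀ (fuel i : Nat) (n1 n2 s1 s2 : Int),
      (2 : Int) ^ i ≤ K →
      (i = 0 ∨ (n1, n2, s1, s2) = stInv N (i - 1)) →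
      K < 2 ^ (i + fuel) →
      solveStallsLoop N K fuel i (2 ^ i - 1) n1 n2 s1 s2 = some (solve_stalls_alt N K) := by
  intro fuel
  induction fuel with
  | zero =>
    intro i n1 n2 s1 s2 hlo _ hfuel
    simp only [Nat.add_zero] at hfuel
    omega
  | succ f ih =>
    intro i n1 n2 s1 s2 hlo hst hfuel
    have hstate : (if i = 0 then ((1 : Int), (0 : Int), N, N - 1) else splitSpaces n1 n2 s1 s2)
        = stInv N i := by
      by_cases hi0 : i = 0
      · subst hi0; rw [if_pos rfl, stInv_zero]
      · rcases hst with h0 | hs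
        · exact absurd h0 hi0
        · rcases hp : stInv N (i - 1) with ⟨a, b, c, d⟩
          rw [hp] at hs
          simp only [Prod.mk.injEq] at hs
          obtain ⟨e1, e2, e3, e4⟩ := hs
          subst e1; subst e2; subst e3; subst e4
          rw [if_neg hi0]
          have hstep := stInv_step N (i - 1)
          rw [hp] at hstep
          simp only at hstep
          rwa [Nat.sub_add_cancel (by omega)] at hstep
    rcases hInv : stInv N i with ⟨a, b, c, d⟩
    rw [solveStallsLoop, hstate, hInv]
    simp only
    have hnewK : (2 : Int) ^ i - 1 + 2 ^ i = 2 ^ (i + 1) - 1 := by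
      have : (2 : Int) ^ (i + 1) = 2 * 2 ^ i := by ring
      omega
    rw [hnewK]
    by_cases hlt : (2 : Int) ^ (i + 1) - 1 < K
    · rw [if_pos hlt]
      have hlo' : (2 : Int) ^ (i + 1) ≤ K := by omega
      exact ih (i + 1) a b c d hlo'
        (Or.inr (by rw [Nat.add_sub_cancel]; exact hInv.symm))
        (by rw [show i + 1 + f = i + (f + 1) by omega]; exact hfuel)
    · rw [if_neg hlt]
      have hhi : K < 2 ^ (i + 1) := by omega
      have hs := stop_eq N K i hlo hhi
      rw [hInv] at hs
      simp only at hs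
      rw [← hs]
      by_cases hc : K - (2 ^ i - 1) ≤ a
      · simp [hc]
      · simp [hc]

-- ===== VERDICT (by name: the statement is the Claim_ definition above) =====
theorem solve_stalls_spec : Claim_equal_solve_stalls := by
  intro N K hDom hPre
  unfold Spec_solve_stalls
  obtain ⟨hN, hKub⟩ := hPre
  unfold Dom_solve_stalls at hDom
  simp only [Bool.and_eq_true, pvDomInt, decide_eq_true_eq] at hDom
  by_cases hK : 1 ≤ K
  · -- K ≥ 1: run the loop invariant from i = 0
    have hfuel : K < 2 ^ (0 + N.toNat) := by
      simp only [Nat.zero_add]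
      by_cases h62 : N.toNat ≤ 62
      · have hmin : min N.toNat 62 = N.toNat := by omega
        rw [hmin] at hKub
        have : (0:Int) < 2 ^ N.toNat := by positivity
        omega
      · have h2 : (2:Int) ^ 62 ≤ 2 ^ N.toNat := by
          apply pow_le_pow_right₀ (by norm_num) (by omega)
        have : (2147483648 : Int) < 2 ^ 62 := by norm_num
        omega
    have h := loop_eq N K hK N.toNat 0 0 0 0 0 (by simpa using hK) (Or.inl rfl) hfuel
    norm_num at h
    unfold solve_stalls
    rw [h]
    rfl
  · -- K ≤ 0: the first iteration already returns split_one_space(N) on both sides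
    have hK0 : K ≤ 0 := by omega
    obtain ⟨f, hf⟩ : ∃ f, N.toNat = f + 1 := ⟨N.toNat - 1, by omega⟩
    have hA : solveStallsLoop N K (f + 1) 0 0 0 0 0 0 = some (splitOneSpace N) := by
      rw [solveStallsLoop]
      simp only []
      norm_num
      rw [if_neg (by omega), if_pos (by omega)]
    -- B side: max K 1 = 1, bitLength 1 = 1, level 0, m = 1, r = 0
    have hmax : max K 1 = 1 := by omega
    have hB : solve_stalls_alt N K = splitOneSpace N := by
      unfold solve_stalls_alt
      simp only []
      rw [hmax]
      have hbl : PySem.Int.bitLength 1 = 1 := rfl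
      rw [hbl]
      simp only [Nat.sub_self, pow_zero]
      rw [PySem.Int.floordiv_eq_ediv_of_pos (by norm_num),
        PySem.Int.mod_eq_emod_of_pos (by norm_num)]
      simp
    unfold solve_stalls
    rw [hf, hA, hB]
    rfl
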